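-- pv_equiv track=rewrite | github.com/hilbenchauthors/hil-bench | SWE-agent/sweagent/tools/sql_tools.py | _expand_ansi_c_quotes
-- ===== SOURCE A (Python) =====
-- import shlex
--
-- def _expand_ansi_c_quotes(s: str) -> str:
--     """Convert bash ANSI-C $'...' quoting to POSIX-compatible quoting for shlex.
--     Used for SQL tool call parsing.
--
--     shlex.split() is POSIX-only and mishandles bash's $'...' quoting in two ways:
--       1. It treats $'foo' as literal-$ concatenated with POSIX-quoted 'foo', yielding '$foo'.
--       2. If the ANSI-C content contains \\' (escaped apostrophe), shlex raises ValueError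
--          because POSIX single-quotes cannot contain a literal single-quote.
--
--     This preprocessor expands every $'...' sequence to its actual string content, then
--     re-quotes it with shlex.quote() so the result is valid POSIX for shlex.split().
--
--     Examples:
--         $'financial'              -> 'financial'
--         $'unemployment rate'      -> 'unemployment rate'
--         $'What\\'s the policy?'   -> "What's the policy?"
--     """
--     _ansi_escape_map = {
--         "n": "\n", "r": "\r", "t": "\t", "a": "\a",
--         "b": "\b", "f": "\f", "v": "\v",
--         "0": "\0", "'": "'", "\\": "\\",
--     }
--     result: list[str] = []
--     i = 0
--     while i < len(s):
--         if s[i] == "$" and i + 1 < len(s) and s[i + 1] == "'":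
--             j = i + 2
--             content: list[str] = []
--             while j < len(s):
--                 if s[j] == "\\" and j + 1 < len(s):
--                     content.append(_ansi_escape_map.get(s[j + 1], s[j + 1]))
--                     j += 2
--                 elif s[j] == "'":
--                     j += 1
--                     break
--                 else:
--                     content.append(s[j])
--                     j += 1
--             result.append(shlex.quote("".join(content)))
--             i = j
--         else:
--             result.append(s[i])
--             i += 1
--     return "".join(result)
-- ===== SOURCE B (Python) =====
-- import re
--
-- _ansi_escape_map = {
--     "n": "\n", "r": "\r", "t": "\t", "a": "\a",
--     "b": "\b", "f": "\f", "v": "\v",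
--     "0": "\0", "'": "'", "\\": "\\",
-- }
--
-- # POSIX re-quoting, same rule as shlex.quote (inlined; shlex may not be imported here)
-- _find_unsafe = re.compile(r"[^\w@%+=:,./-]", re.ASCII).search
--
--
-- def _posix_quote(s: str) -> str:
--     if not s:
--         return "''"
--     if _find_unsafe(s) is None:
--         return s
--     return "'" + s.replace("'", "'\"'\"'") + "'"
--
--
-- def _expand_ansi_c_quotes(s: str) -> str:
--     def _repl(m: "re.Match") -> str:
--         content = re.sub(
--             r"\\(.)",
--             lambda e: _ansi_escape_map.get(e.group(1), e.group(1)),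
--             m.group(1),
--             flags=re.DOTALL,
--         )
--         return _posix_quote(content)
--
--     return re.sub(r"\$'((?:\\.|[^'])*)'?", _repl, s, flags=re.DOTALL)
-- ===== Notes on version B (the rewrite author's own statement) =====
-- stated objective: idiomatic
-- what changed: A's hand-written character-index loop with inline escape handling is replaced by one re.sub matching each ANSI-C dollar-quoted span (optional closing quote, DOTALL), whose replacement expands the escapes with a second re.sub and POSIX-quotes the result.
import Mathlib
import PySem

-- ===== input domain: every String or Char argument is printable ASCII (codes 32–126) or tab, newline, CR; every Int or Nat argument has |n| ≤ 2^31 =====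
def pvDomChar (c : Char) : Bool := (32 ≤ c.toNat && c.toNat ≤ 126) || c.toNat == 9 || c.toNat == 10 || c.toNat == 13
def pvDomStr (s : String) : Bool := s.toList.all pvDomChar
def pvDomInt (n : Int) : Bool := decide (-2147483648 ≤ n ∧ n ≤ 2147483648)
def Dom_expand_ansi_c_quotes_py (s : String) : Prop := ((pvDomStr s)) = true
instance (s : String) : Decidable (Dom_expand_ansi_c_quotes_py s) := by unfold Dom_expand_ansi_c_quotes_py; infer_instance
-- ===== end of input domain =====

-- B replaces A's manual index loop with a regex substitution (re.sub over the ANSI-C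
-- dollar-quoted spans, a second re.sub expanding each span's escapes); objective: idiomatic.

-- shared helper: faithful port of shlex.quote (both Pythons call it).
-- Python's `_find_unsafe` regex: a char is safe iff it is ASCII \w or one of @%+=:,./-
def pvSafeChar (c : Char) : Bool :=
  ('a' ≤ c && c ≤ 'z') || ('A' ≤ c && c ≤ 'Z') || ('0' ≤ c && c ≤ '9') ||
  c == '_' || c == '@' || c == '%' || c == '+' || c == '=' || c == ':' ||
  c == ',' || c == '.' || c == '/' || c == '-'

def pvQuote (cs : List Char) : List Char :=
  if cs = [] then ['\'', '\'']
  else if cs.all pvSafeChar then cs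
  else '\'' :: (cs.flatMap (fun c => if c = '\'' then "'\"'\"'".toList else [c])) ++ ['\'']

-- shared helper: the `_ansi_escape_map.get(c, c)` lookup (both Pythons use the same dict;
-- `'` and `\` map to themselves, so the default branch covers them).
def pvAnsiMap (c : Char) : Char :=
  if c = 'n' then Char.ofNat 10
  else if c = 'r' then Char.ofNat 13
  else if c = 't' then Char.ofNat 9
  else if c = 'a' then Char.ofNat 7
  else if c = 'b' then Char.ofNat 8
  else if c = 'f' then Char.ofNat 12
  else if c = 'v' then Char.ofNat 11
  else if c = '0' then Char.ofNat 0
  else c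

-- ===== PORT A =====
-- A's inner while-loop (index j): consume chars up to and including the closing quote,
-- mapping each escape pair through the map on the fly; returns (content, rest of string).
def pvAInner : List Char → List Char × List Char
  | [] => ([], [])
  | '\\' :: c :: rest => (pvAnsiMap c :: (pvAInner rest).1, (pvAInner rest).2)
  | c :: rest =>
      if c = '\'' then ([], rest)
      else (c :: (pvAInner rest).1, (pvAInner rest).2)

theorem pvAInner_len : ∀ l : List Char, (pvAInner l).2.length ≤ l.length := by
  intro l
  fun_induction pvAInner l <;> simp_all <;> omega

-- A's outer while-loop (index i): on "$'" expand a span, else copy one char.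
def pvALoop : List Char → List Char
  | [] => []
  | '$' :: '\'' :: rest =>
      pvQuote (pvAInner rest).1 ++ pvALoop (pvAInner rest).2
  | c :: rest => c :: pvALoop rest
termination_by l => l.length
decreasing_by
  · have := pvAInner_len rest; simp; omega
  · simp

def expand_ansi_c_quotes_py (s : String) : String :=
  String.mk (pvALoop s.toList)

-- ===== PORT B =====
-- the regex piece ((?:\\.|[^'])*)'? : greedily capture the raw (still-escaped) content,
-- then consume an optional closing quote; returns (captured group 1, rest after the match).
def pvBBody : List Char → List Char × List Char
  | [] => ([], [])
  | '\\' :: c :: rest => ('\\' :: c :: (pvBBody rest).1, (pvBBody rest).2)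
  | c :: rest =>
      if c = '\'' then ([], rest)
      else (c :: (pvBBody rest).1, (pvBBody rest).2)

-- the inner re.sub(r'\\(.)', …): a second pass expanding escapes in the captured content
def pvBUnescape : List Char → List Char
  | [] => []
  | '\\' :: c :: rest => pvAnsiMap c :: pvBUnescape rest
  | c :: rest => c :: pvBUnescape rest

-- try to match the pattern \$'((?:\\.|[^'])*)'? at the current position
def pvBTryMatch : List Char → Option (List Char × List Char)
  | '$' :: '\'' :: rest => some (pvBBody rest)
  | _ => none

theorem pvBBody_len : ∀ l : List Char, (pvBBody l).2.length ≤ l.length := by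
  intro l
  fun_induction pvBBody l <;> simp_all <;> omega

theorem pvBTryMatch_lt {l : List Char} {p : List Char × List Char}
    (h : pvBTryMatch l = some p) : p.2.length < l.length := by
  unfold pvBTryMatch at h
  split at h
  · rename_i rest
    cases h
    have := pvBBody_len rest
    simp; omega
  · cases h

-- re.sub's scan: at each position try the pattern; on a match emit repl(m) and resume
-- after the match, otherwise copy one char.
def pvBSub : List Char → List Char
  | [] => []
  | c :: rest =>
      match h : pvBTryMatch (c :: rest) with
      | some p => pvQuote (pvBUnescape p.1) ++ pvBSub p.2
      | none => c :: pvBSub rest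
termination_by l => l.length
decreasing_by
  · exact pvBTryMatch_lt h
  · simp

def expand_ansi_c_quotes_py_alt (s : String) : String :=
  String.mk (pvBSub s.toList)

-- ===== PRECONDITION & SPEC =====
def Spec_expand_ansi_c_quotes_py (s : String) (out : String) : Prop := out = expand_ansi_c_quotes_py_alt s
instance (s : String) (out : String) : Decidable (Spec_expand_ansi_c_quotes_py s out) := by unfold Spec_expand_ansi_c_quotes_py; infer_instance

-- ===== CLAIM (what is proved, stated in full; the proofs are below) =====
def Claim_equal_expand_ansi_c_quotes_py : Prop := ∀ (s : String), Dom_expand_ansi_c_quotes_py s → Spec_expand_ansi_c_quotes_py s (expand_ansi_c_quotes_py s)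

-- ===== LEMMAS AND PROOFS =====

-- capturing raw content and unescaping it afterwards (B) equals mapping escapes on
-- the fly (A), and both consume exactly the same prefix of the string
theorem pvBUnescape_cons {c : Char} (xs : List Char) (hc : ¬ c = '\\') :
    pvBUnescape (c :: xs) = c :: pvBUnescape xs := by
  rw [pvBUnescape.eq_def]
  split
  · simp_all
  · rename_i heq
    injection heq with h1 _
    exact absurd h1 hc
  · rename_i heq
    injection heq with h1 h2
    rw [h1, h2]

theorem pvBody_spec : ∀ l : List Char,
    pvBUnescape (pvBBody l).1 = (pvAInner l).1 ∧ (pvBBody l).2 = (pvAInner l).2 := by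
  intro l
  fun_induction pvBBody l with
  | case1 => simp [pvAInner, pvBUnescape]
  | case2 c rest ih => simp [pvAInner, pvBUnescape, ih.1, ih.2]
  | case3 rest hnm => simp [pvAInner, pvBUnescape]
  | case4 c rest hnomatch hq ih =>
      by_cases hc : c = '\\'
      · -- then hnomatch forces rest = []
        subst hc
        cases rest with
        | nil => simp [pvAInner, pvBUnescape, pvBBody]
        | cons d tl => exact (hnomatch d tl rfl rfl).elim
      · simp [pvAInner, pvBUnescape_cons _ hc, hq, ih.1, ih.2]

theorem pvBTryMatch_none {c : Char} {rest : List Char}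
    (h : ∀ (r : List Char), c = '$' → rest = '\'' :: r → False) :
    pvBTryMatch (c :: rest) = none := by
  unfold pvBTryMatch
  split
  · rename_i x rest' heq
    injection heq with hc hr
    exact absurd (h _ hc hr) not_false
  · rfl

theorem pv_main : ∀ l : List Char, pvALoop l = pvBSub l := by
  intro l
  fun_induction pvALoop l with
  | case1 => simp [pvBSub]
  | case2 rest ih =>
      rw [pvBSub]
      split
      · rename_i p heq
        simp only [pvBTryMatch, Option.some.injEq] at heq
        subst heq
        have hb := pvBody_spec rest
        rw [hb.1, hb.2, ih]
      · rename_i heq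
        simp [pvBTryMatch] at heq
  | case3 c rest h1 ih =>
      rw [pvBSub]
      split
      · rename_i p heq
        rw [pvBTryMatch_none h1] at heq
        cases heq
      · rw [ih]

-- ===== VERDICT (by name: the statement is the Claim_ definition above) =====
theorem expand_ansi_c_quotes_py_spec : Claim_equal_expand_ansi_c_quotes_py := by
  intro s _
  unfold Spec_expand_ansi_c_quotes_py expand_ansi_c_quotes_py expand_ansi_c_quotes_py_alt
  rw [pv_main]
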